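-- pv_equiv track=rewrite | github.com/SangYeongLee/pr_practice | previous/study3.py | allAns
-- ===== SOURCE A (Python) =====
-- def allAns(arr,depth):
-- 	ret=[]
-- 	if depth==1:
-- 		for i in arr:
-- 			ret.append(str(i))
-- 		return ret
-- 	else:
-- 		for i in arr:
-- 			temp = arr.copy()
-- 			temp.remove(i)
-- 			for j in allAns(temp,depth-1):
-- 				val = str(i)+j
-- 				if val not in ret:
-- 					ret.append(val)
-- 		return ret
-- ===== SOURCE B (Python) =====
-- def allAns(arr, depth):
--     if depth < 1:
--         return []
--     if depth == 1:
--         return [str(i) for i in arr]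
--     # breadth-first frontier expansion: each state is (prefix string, remaining values);
--     # after `depth` expansions the prefixes are exactly A's candidate strings in A's order,
--     # deduplicated once at the end (first occurrence wins).
--     states = [("", arr)]
--     for _ in range(depth):
--         if not states:
--             break
--         nxt = []
--         for p, rem in states:
--             for i in rem:
--                 temp = rem.copy()
--                 temp.remove(i)
--                 nxt.append((p + str(i), temp))
--         states = nxt
--     return list(dict.fromkeys(p for p, _ in states))
-- ===== Notes on version B (the rewrite author's own statement) =====
-- stated objective: alternative
-- what changed: A's recursion deduplicates with a linear 'val not in ret' scan at every recursion level; B expands an iterative frontier of (prefix, remaining) states with no per-level dedup and deduplicates the finished strings once at the end with dict.fromkeys.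
import Mathlib
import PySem

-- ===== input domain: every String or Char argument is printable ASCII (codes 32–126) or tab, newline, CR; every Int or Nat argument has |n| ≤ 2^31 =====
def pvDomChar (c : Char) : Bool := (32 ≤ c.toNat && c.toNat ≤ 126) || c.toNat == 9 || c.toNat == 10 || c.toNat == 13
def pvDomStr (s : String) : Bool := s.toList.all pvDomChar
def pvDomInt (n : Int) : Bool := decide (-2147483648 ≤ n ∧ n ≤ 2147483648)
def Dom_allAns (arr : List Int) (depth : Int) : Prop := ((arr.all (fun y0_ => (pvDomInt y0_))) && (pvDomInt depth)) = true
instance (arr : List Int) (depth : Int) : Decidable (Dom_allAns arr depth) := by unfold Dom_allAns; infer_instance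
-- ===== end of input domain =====

-- B replaces A's recursion-with-dedup-at-every-level by one iterative frontier expansion plus a single
-- final ordered dedup (alternative decomposition, same results proved equal).

-- ===== PORT A =====
def allAns (arr : List Int) (depth : Int) : List String :=
  if depth == 1 then
    arr.foldl (fun ret i => ret ++ [PySem.Int.toStr i]) []
  else
    arr.attach.foldl (fun ret x =>
      (allAns ((PySem.List.remove? arr x.1).getD []) (depth - 1)).foldl
        (fun ret2 j =>
          if (PySem.Int.toStr x.1 ++ j) ∈ ret2 then ret2 else ret2 ++ [PySem.Int.toStr x.1 ++ j])
        ret) []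
termination_by arr.length
decreasing_by
  rename_i x
  rw [PySem.List.remove?_eq_some_erase arr x.1 x.2, Option.getD_some]
  have h1 := List.length_erase_of_mem x.2
  have h2 := List.length_pos_of_mem x.2
  omega

-- ===== PORT B =====
-- one frontier-expansion step: every state (prefix, remaining) spawns one child per remaining value
def stepB (states : List (String × List Int)) : List (String × List Int) :=
  states.flatMap (fun s =>
    s.2.attach.map (fun x => (s.1 ++ PySem.Int.toStr x.1, (PySem.List.remove? s.2 x.1).getD [])))

-- the expansion loop, with Source B's 'if not states: break' early exit
def iterB : Nat → List (String × List Int) → List (String × List Int)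
  | 0, st => st
  | n+1, st => if st = [] then st else iterB n (stepB st)

def allAns_alt (arr : List Int) (depth : Int) : List String :=
  if depth < 1 then []
  else if depth == 1 then arr.map PySem.Int.toStr
  else
    PySem.List.dedup ((iterB depth.toNat [("", arr)]).map Prod.fst)

-- ===== PRECONDITION & SPEC =====
def Spec_allAns (arr : List Int) (depth : Int) (out : List String) : Prop := out = allAns_alt arr depth
instance (arr : List Int) (depth : Int) (out : List String) : Decidable (Spec_allAns arr depth out) := by unfold Spec_allAns; infer_instance

-- ===== CLAIM (what is proved, stated in full; the proofs are below) =====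
def Claim_equal_allAns : Prop := ∀ (arr : List Int) (depth : Int), Dom_allAns arr depth → Spec_allAns arr depth (allAns arr depth)

-- ===== LEMMAS AND PROOFS =====

-- the raw (un-deduplicated) stream of candidate strings A's recursion walks through, in A's order
def Raw (arr : List Int) (d : Int) : List String :=
  if d == 1 then arr.map PySem.Int.toStr
  else arr.attach.flatMap (fun x =>
    (Raw (arr.erase x.1) (d - 1)).map (fun j => PySem.Int.toStr x.1 ++ j))
termination_by arr.length
decreasing_by
  rename_i x
  have h1 := List.length_erase_of_mem x.2
  have h2 := List.length_pos_of_mem x.2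
  omega

-- the same stream, indexed by a Nat depth the way B's frontier loop counts it
def GN : List Int → Nat → List String
  | _, 0 => [""]
  | rem, n+1 => rem.attach.flatMap (fun x =>
      (GN (rem.erase x.1) n).map (fun j => PySem.Int.toStr x.1 ++ j))

theorem dedup_nil : PySem.List.dedup ([] : List String) = [] := by
  simp [PySem.List.dedup_eq_ofList, PySem.Set.ofList_nil]

theorem update_nil_eq_dedup (l : List String) : PySem.Set.update [] l = PySem.List.dedup l := by
  simp [PySem.Set.update_eq_append_filter, PySem.List.dedup_eq_ofList]

theorem dedup_append (u t : List String) :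
    PySem.List.dedup (u ++ t)
      = PySem.List.dedup u ++ (PySem.List.dedup t).filter (fun y => !((PySem.List.dedup u).contains y)) := by
  simp [PySem.List.dedup_eq_ofList, PySem.Set.ofList_append, PySem.Set.update_eq_append_filter]

theorem dedup_append_congr {u u' t t' : List String}
    (hu : PySem.List.dedup u = PySem.List.dedup u') (ht : PySem.List.dedup t = PySem.List.dedup t') :
    PySem.List.dedup (u ++ t) = PySem.List.dedup (u' ++ t') := by
  rw [dedup_append, dedup_append, hu, ht]

theorem dedup_append_singleton (l : List String) (a : String) :
    PySem.List.dedup (l ++ [a]) = PySem.Set.add (PySem.List.dedup l) a := by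
  simp [PySem.List.dedup_eq_ofList, PySem.Set.ofList_append_singleton]

theorem dedup_map_dedup (f : String → String) (l : List String) :
    PySem.List.dedup ((PySem.List.dedup l).map f) = PySem.List.dedup (l.map f) := by
  induction l using List.reverseRecOn with
  | nil => simp [dedup_nil]
  | append_singleton l a ih =>
    by_cases h : a ∈ l
    · have h1 : PySem.List.dedup (l ++ [a]) = PySem.List.dedup l := by
        rw [dedup_append_singleton]
        simp [PySem.Set.add, h]
      have h2 : f a ∈ l.map f := List.mem_map_of_mem h
      rw [h1, ih, List.map_append, List.map_singleton, dedup_append_singleton]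
      simp [PySem.Set.add, h2]
    · have h1 : PySem.List.dedup (l ++ [a]) = PySem.List.dedup l ++ [a] := by
        rw [dedup_append_singleton]
        simp [PySem.Set.add, h]
      rw [h1, List.map_append, List.map_singleton, List.map_append, List.map_singleton,
        dedup_append_singleton, dedup_append_singleton, ih]

theorem dedup_flatten_congr {ss ss' : List (List String)}
    (h : List.Forall₂ (fun u v => PySem.List.dedup u = PySem.List.dedup v) ss ss') :
    PySem.List.dedup ss.flatten = PySem.List.dedup ss'.flatten := by
  induction h with
  | nil => rfl
  | cons h _ ih =>
    rw [List.flatten_cons, List.flatten_cons]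
    exact dedup_append_congr h ih

theorem foldl_mem_add (l ret : List String) :
    l.foldl (fun r v => if v ∈ r then r else r ++ [v]) ret = PySem.Set.update ret l := by
  induction l generalizing ret with
  | nil => rw [PySem.Set.update_nil]; rfl
  | cons x xs ih =>
    rw [List.foldl_cons, PySem.Set.update_cons, ih]
    congr 1
    simp [PySem.Set.add]

theorem foldl_update_flatMap {α : Type} (l : List α) (seg : α → List String) (s : List String) :
    l.foldl (fun r x => PySem.Set.update r (seg x)) s = PySem.Set.update s (l.flatMap seg) := by
  induction l generalizing s with
  | nil => simp [PySem.Set.update_nil]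
  | cons x xs ih => rw [List.foldl_cons, List.flatMap_cons, PySem.Set.update_append, ih]

-- A's value at depth ≠ 1 is the ordered dedup of the raw stream
theorem allAns_eq_dedup_Raw : ∀ (n : Nat) (arr : List Int) (d : Int), arr.length ≤ n → d ≠ 1 →
    allAns arr d = PySem.List.dedup (Raw arr d) := by
  intro n
  induction n with
  | zero =>
    intro arr d hn hd
    have harr : arr = [] := List.eq_nil_of_length_eq_zero (Nat.le_zero.mp hn)
    subst harr
    rw [allAns.eq_def, Raw.eq_def, if_neg (by simpa using hd), if_neg (by simpa using hd)]
    simp [PySem.List.dedup_eq_ofList, PySem.Set.ofList_nil]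
  | succ n ih =>
    intro arr d hn hd
    rw [allAns.eq_def, Raw.eq_def, if_neg (by simpa using hd), if_neg (by simpa using hd)]
    have hbody : ∀ (x : {a // a ∈ arr}) (ret : List String),
        (allAns ((PySem.List.remove? arr x.1).getD []) (d - 1)).foldl
          (fun ret2 j =>
            if (PySem.Int.toStr x.1 ++ j) ∈ ret2 then ret2 else ret2 ++ [PySem.Int.toStr x.1 ++ j])
          ret
        = PySem.Set.update ret
            ((allAns (arr.erase x.1) (d - 1)).map (fun j => PySem.Int.toStr x.1 ++ j)) := by
      intro x ret
      rw [PySem.List.remove?_eq_some_erase arr x.1 x.2, Option.getD_some, ← foldl_mem_add,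
        List.foldl_map]
    calc arr.attach.foldl (fun ret x =>
            (allAns ((PySem.List.remove? arr x.1).getD []) (d - 1)).foldl
              (fun ret2 j =>
                if (PySem.Int.toStr x.1 ++ j) ∈ ret2 then ret2
                else ret2 ++ [PySem.Int.toStr x.1 ++ j]) ret) []
        = arr.attach.foldl (fun ret x =>
            PySem.Set.update ret
              ((allAns (arr.erase x.1) (d - 1)).map (fun j => PySem.Int.toStr x.1 ++ j))) [] := by
          exact PySem.List.foldl_congr_mem _ _ _ _ (fun ret x _ => hbody x ret)
      _ = PySem.Set.update []
            (arr.attach.flatMap (fun x =>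
              (allAns (arr.erase x.1) (d - 1)).map (fun j => PySem.Int.toStr x.1 ++ j))) := by
          rw [foldl_update_flatMap]
      _ = PySem.List.dedup
            (arr.attach.flatMap (fun x =>
              (allAns (arr.erase x.1) (d - 1)).map (fun j => PySem.Int.toStr x.1 ++ j))) := by
          rw [update_nil_eq_dedup]
      _ = PySem.List.dedup
            (arr.attach.flatMap (fun x =>
              (Raw (arr.erase x.1) (d - 1)).map (fun j => PySem.Int.toStr x.1 ++ j))) := by
          rw [List.flatMap_def, List.flatMap_def]
          apply dedup_flatten_congr
          rw [List.forall₂_map_left_iff, List.forall₂_map_right_iff]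
          apply List.forall₂_same.mpr
          intro x hx
      -- per segment: A's inner list and the raw inner list have the same ordered dedup
          by_cases hd1 : d - 1 = 1
          · have : allAns (arr.erase x.1) (d - 1) = Raw (arr.erase x.1) (d - 1) := by
              rw [allAns.eq_def, Raw.eq_def, if_pos (by simpa using hd1), if_pos (by simpa using hd1)]
              rw [PySem.List.foldl_append_singleton_eq_map, List.nil_append]
            rw [this]
          · have hlen : (arr.erase x.1).length ≤ n := by
              have h1 := List.length_erase_of_mem x.2
              have h2 := List.length_pos_of_mem x.2
              omega
            rw [ih (arr.erase x.1) (d - 1) hlen hd1, dedup_map_dedup]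
  
-- the raw stream is empty for non-positive depth
theorem Raw_nonpos : ∀ (n : Nat) (arr : List Int) (d : Int), arr.length ≤ n → d ≤ 0 →
    Raw arr d = [] := by
  intro n
  induction n with
  | zero =>
    intro arr d hn hd
    have harr : arr = [] := List.eq_nil_of_length_eq_zero (Nat.le_zero.mp hn)
    subst harr
    rw [Raw.eq_def, if_neg (by simp; omega)]
    simp
  | succ n ih =>
    intro arr d hn hd
    rw [Raw.eq_def, if_neg (by simp; omega)]
    apply List.flatMap_eq_nil_iff.mpr
    intro x hx
    have hlen : (arr.erase x.1).length ≤ n := by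
      have h1 := List.length_erase_of_mem x.2
      have h2 := List.length_pos_of_mem x.2
      omega
    rw [ih (arr.erase x.1) (d - 1) hlen (by omega)]
    rfl

theorem iterB_eq_foldl : ∀ (n : Nat) (st : List (String × List Int)),
    iterB n st = (List.range n).foldl (fun s _ => stepB s) st := by
  intro n
  induction n with
  | zero => intro st; rfl
  | succ n ih =>
    intro st
    rw [List.range_succ_eq_map, List.foldl_cons, List.foldl_map, ← ih]
    by_cases h : st = []
    · subst h
      rw [iterB, if_pos rfl]
      show ([] : List (String × List Int)) = iterB n (stepB [])
      have hstep : stepB ([] : List (String × List Int)) = [] := rfl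
      rw [hstep]
      induction n with
      | zero => rfl
      | succ m ihm => rw [iterB, if_pos rfl]
    · rw [iterB, if_neg h]

-- B's frontier after n steps carries exactly the prefixed raw streams
theorem frontier_map_fst : ∀ (n : Nat) (S : List (String × List Int)),
    ((List.range n).foldl (fun st _ => stepB st) S).map Prod.fst
      = S.flatMap (fun pr => (GN pr.2 n).map (fun j => pr.1 ++ j)) := by
  intro n
  induction n with
  | zero =>
    intro S
    simp only [List.range_zero, List.foldl_nil, GN, List.map_cons, List.map_nil,
      String.append_empty]
    exact List.map_eq_flatMap
  | succ n ih =>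
    intro S
    rw [List.range_succ_eq_map, List.foldl_cons, List.foldl_map, ih]
    rw [stepB, List.flatMap_assoc]
    apply List.flatMap_congr
    intro pr _
    rw [List.flatMap_map]
    show pr.2.attach.flatMap _ = _
    conv_rhs => rw [GN, List.map_flatMap]
    apply List.flatMap_congr
    intro x _
    rw [PySem.List.remove?_eq_some_erase pr.2 x.1 x.2, Option.getD_some]
    simp [Function.comp, String.append_assoc]

-- the Int-indexed raw stream equals the Nat-indexed one B's loop walks
theorem Raw_eq_GN : ∀ (n : Nat) (arr : List Int) (d : Int), arr.length ≤ n → 1 ≤ d →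
    Raw arr d = GN arr d.toNat := by
  intro n
  induction n with
  | zero =>
    intro arr d hn hd
    have harr : arr = [] := List.eq_nil_of_length_eq_zero (Nat.le_zero.mp hn)
    subst harr
    have hm : ∃ m : Nat, d.toNat = m + 1 := ⟨d.toNat - 1, by omega⟩
    obtain ⟨m, hm⟩ := hm
    rw [hm, GN]
    by_cases h1 : d = 1
    · rw [Raw.eq_def, if_pos (by simpa using h1)]; simp
    · rw [Raw.eq_def, if_neg (by simpa using h1)]; simp
  | succ n ih =>
    intro arr d hn hd
    by_cases h1 : d = 1
    · subst h1
      rw [Raw.eq_def, if_pos (by norm_num)]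
      show _ = GN arr (0 + 1)
      rw [GN]
      have : ∀ x ∈ arr.attach, (GN (arr.erase x.1) 0).map (fun j => PySem.Int.toStr x.1 ++ j)
          = [PySem.Int.toStr x.1] := by
        intro x _
        simp [GN, String.append_empty]
      rw [List.flatMap_congr this, ← List.map_eq_flatMap]
      exact List.attach_map_val.symm
    · have hm : ∃ m : Nat, d.toNat = m + 1 ∧ (d - 1).toNat = m := ⟨d.toNat - 1, by omega, by omega⟩
      obtain ⟨m, hm1, hm2⟩ := hm
      rw [Raw.eq_def, if_neg (by simpa using h1), hm1, GN]
      apply List.flatMap_congr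
      intro x _
      have hlen : (arr.erase x.1).length ≤ n := by
        have h1 := List.length_erase_of_mem x.2
        have h2 := List.length_pos_of_mem x.2
        omega
      rw [ih (arr.erase x.1) (d - 1) hlen (by omega), hm2]

-- ===== VERDICT (by name: the statement is the Claim_ definition above) =====
theorem allAns_spec : Claim_equal_allAns := by
  intro arr depth _
  unfold Spec_allAns allAns_alt
  by_cases h1 : depth = 1
  · subst h1
    rw [allAns.eq_def, if_pos (by norm_num), PySem.List.foldl_append_singleton_eq_map, List.nil_append]
    norm_num
  · by_cases hlt : depth < 1
    · rw [if_pos hlt, allAns_eq_dedup_Raw arr.length arr depth le_rfl h1,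
        Raw_nonpos arr.length arr depth le_rfl (by omega), dedup_nil]
    · rw [if_neg hlt, if_neg (by simpa using h1),
        allAns_eq_dedup_Raw arr.length arr depth le_rfl h1,
        Raw_eq_GN arr.length arr depth le_rfl (by omega),
        iterB_eq_foldl, frontier_map_fst]
      simp [String.empty_append]
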